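-- pv_equiv track=rewrite | github.com/pypi-data/pypi-mirror-382 | packages/norvelang/norvelang-0.2.1-py3-none-any.whl/norve/interpreter/backend/column_utils.py | _try_dotted_key_strategies
-- ===== SOURCE A (Python) =====
-- from typing import List, Optional
--
-- def _try_dotted_key_strategies(
--     req_prefix: str, req_col: str, row_keys: List[str]
-- ) -> Optional[str]:
--     """Try different strategies for matching dotted keys."""
--     # Strategy 1: match keys that end with the requested column and have a similar prefix
--     matches = [
--         k
--         for k in row_keys
--         if k.endswith(f".{req_col}") and k.split(".", 1)[0].startswith(req_prefix)
--     ]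
--     if len(matches) == 1:
--         return matches[0]
--
--     # Strategy 2: any key that ends with the column name
--     matches = [k for k in row_keys if k.endswith(f".{req_col}")]
--     if len(matches) == 1:
--         return matches[0]
--
--     # Strategy 3: try base column name
--     if req_col in row_keys:
--         return req_col
--
--     # Strategy 4: case-insensitive match for base column
--     matches = [k for k in row_keys if k.lower() == req_col.lower()]
--     if len(matches) == 1:
--         return matches[0]
--
--     return None
-- ===== SOURCE B (Python) =====
-- from typing import List, Optional
--
-- def _try_dotted_key_strategies(
--     req_prefix: str, req_col: str, row_keys: List[str]
-- ) -> Optional[str]: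
--     """Single pass: classify every key into up to four buckets, then decide once."""
--     suffix = "." + req_col
--     col_lower = req_col.lower()
--     b1, b2, b4 = [], [], []
--     exact = False
--     for k in row_keys:
--         if k.endswith(suffix):
--             b2.append(k)
--             if k.split(".", 1)[0].startswith(req_prefix):
--                 b1.append(k)
--         if k == req_col:
--             exact = True
--         if k.lower() == col_lower:
--             b4.append(k)
--     if len(b1) == 1:
--         return b1[0]
--     if len(b2) == 1:
--         return b2[0]
--     if exact:
--         return req_col
--     if len(b4) == 1:
--         return b4[0]
--     return None
-- ===== Notes on version B (the rewrite author's own statement) =====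
-- stated objective: faster
-- what changed: Replaces A's four separate scans/list-comprehensions over row_keys (each rebuilding the '.'+req_col suffix comparison) with a single pass that builds four classification buckets (dotted+prefix, dotted, exact flag, case-insensitive) and a fixed decision afterwards.
import Mathlib
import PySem

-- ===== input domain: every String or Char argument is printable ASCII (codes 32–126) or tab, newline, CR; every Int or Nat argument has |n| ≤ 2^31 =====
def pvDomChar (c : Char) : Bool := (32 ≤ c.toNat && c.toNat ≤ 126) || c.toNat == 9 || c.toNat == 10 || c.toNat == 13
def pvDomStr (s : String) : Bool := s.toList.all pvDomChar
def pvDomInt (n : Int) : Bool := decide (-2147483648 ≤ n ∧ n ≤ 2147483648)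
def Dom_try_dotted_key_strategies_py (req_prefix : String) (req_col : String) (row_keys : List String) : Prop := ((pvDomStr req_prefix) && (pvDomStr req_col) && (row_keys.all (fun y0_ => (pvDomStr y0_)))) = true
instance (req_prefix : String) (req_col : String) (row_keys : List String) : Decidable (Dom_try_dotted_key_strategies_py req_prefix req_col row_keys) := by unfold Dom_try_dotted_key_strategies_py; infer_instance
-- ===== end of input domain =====

-- B replaces A's four separate scans of row_keys with one classification pass
-- building four buckets and a fixed decision afterwards (objective: alternative).

-- ===== PORT A =====
-- k.split(".", 1)[0]: splitMax? is some nonempty list since the separator is nonempty,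
-- so getD defaults are never used (exact on all inputs).
def pvFirstSeg (k : String) : String := ((PySem.Str.splitMax? k "." 1).getD []).getD 0 ""

def try_dotted_key_strategies_py (req_prefix : String) (req_col : String) (row_keys : List String) : Option String :=
  let m1 := row_keys.filter (fun k => PySem.Str.endswith k ("." ++ req_col) && PySem.Str.startswith (pvFirstSeg k) req_prefix)
  if m1.length == 1 then PySem.List.pyGet? m1 0 else
  let m2 := row_keys.filter (fun k => PySem.Str.endswith k ("." ++ req_col))
  if m2.length == 1 then PySem.List.pyGet? m2 0 else
  if row_keys.contains req_col then some req_col else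
  let m4 := row_keys.filter (fun k => PySem.Str.lower k == PySem.Str.lower req_col)
  if m4.length == 1 then PySem.List.pyGet? m4 0 else
  none

-- ===== PORT B =====
-- loop body of B's single pass: classify k into the four buckets
def pvStep (req_prefix : String) (req_col : String)
    (s : List String × List String × Bool × List String) (k : String) :
    List String × List String × Bool × List String :=
  let (b1, b2, ex, b4) := s
  let (b1, b2) :=
    if PySem.Str.endswith k ("." ++ req_col) then
      ((if PySem.Str.startswith (pvFirstSeg k) req_prefix then b1 ++ [k] else b1), b2 ++ [k])
    else (b1, b2)
  let ex := if k == req_col then true else ex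
  let b4 := if PySem.Str.lower k == PySem.Str.lower req_col then b4 ++ [k] else b4
  (b1, b2, ex, b4)

def try_dotted_key_strategies_py_alt (req_prefix : String) (req_col : String) (row_keys : List String) : Option String :=
  let st := row_keys.foldl (pvStep req_prefix req_col) ([], [], false, [])
  if st.1.length == 1 then PySem.List.pyGet? st.1 0 else
  if st.2.1.length == 1 then PySem.List.pyGet? st.2.1 0 else
  if st.2.2.1 then some req_col else
  if st.2.2.2.length == 1 then PySem.List.pyGet? st.2.2.2 0 else
  none

-- ===== PRECONDITION & SPEC =====
def Spec_try_dotted_key_strategies_py (req_prefix : String) (req_col : String) (row_keys : List String) (out : Option String) : Prop := out = try_dotted_key_strategies_py_alt req_prefix req_col row_keys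
instance (req_prefix : String) (req_col : String) (row_keys : List String) (out : Option String) : Decidable (Spec_try_dotted_key_strategies_py req_prefix req_col row_keys out) := by unfold Spec_try_dotted_key_strategies_py; infer_instance

-- ===== CLAIM (what is proved, stated in full; the proofs are below) =====
def Claim_equal_try_dotted_key_strategies_py : Prop := ∀ (req_prefix : String) (req_col : String) (row_keys : List String), Dom_try_dotted_key_strategies_py req_prefix req_col row_keys → Spec_try_dotted_key_strategies_py req_prefix req_col row_keys (try_dotted_key_strategies_py req_prefix req_col row_keys)

-- ===== LEMMAS AND PROOFS =====

-- B's single fold ends with exactly the four filter results A computes.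
theorem pv_fold_state (req_prefix req_col : String) (keys : List String)
    (b1 b2 : List String) (ex : Bool) (b4 : List String) :
    keys.foldl (pvStep req_prefix req_col) (b1, b2, ex, b4)
    = (b1 ++ keys.filter (fun k => PySem.Str.endswith k ("." ++ req_col) && PySem.Str.startswith (pvFirstSeg k) req_prefix),
       b2 ++ keys.filter (fun k => PySem.Str.endswith k ("." ++ req_col)),
       ex || keys.contains req_col,
       b4 ++ keys.filter (fun k => PySem.Str.lower k == PySem.Str.lower req_col)) := by
  induction keys generalizing b1 b2 ex b4 with
  | nil => simp
  | cons k ks ih =>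
    simp only [List.foldl_cons]
    rw [show pvStep req_prefix req_col (b1, b2, ex, b4) k =
        ((if PySem.Str.endswith k ("." ++ req_col) && PySem.Str.startswith (pvFirstSeg k) req_prefix then b1 ++ [k] else b1),
         (if PySem.Str.endswith k ("." ++ req_col) then b2 ++ [k] else b2),
         (if k == req_col then true else ex),
         (if PySem.Str.lower k == PySem.Str.lower req_col then b4 ++ [k] else b4)) from by
      unfold pvStep
      by_cases h1 : PySem.Chars.endswith k.toList ('.' :: req_col.toList) = true <;>
      by_cases h2 : PySem.Chars.startswith (pvFirstSeg k).toList req_prefix.toList = true <;>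
        simp [h1, h2]]
    rw [ih]
    by_cases h3 : k = req_col
    · subst h3
      by_cases h1 : PySem.Chars.endswith k.toList ('.' :: k.toList) = true <;>
      by_cases h2 : PySem.Chars.startswith (pvFirstSeg k).toList req_prefix.toList = true <;>
      by_cases h4 : PySem.Str.lower k = PySem.Str.lower k <;>
        simp [h1, h2]
    · by_cases h1 : PySem.Chars.endswith k.toList ('.' :: req_col.toList) = true <;>
      by_cases h2 : PySem.Chars.startswith (pvFirstSeg k).toList req_prefix.toList = true <;>
      by_cases h4 : PySem.Str.lower k = PySem.Str.lower req_col <;>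
        simp [h1, h2, h3, Ne.symm h3, h4]

-- ===== VERDICT (by name: the statement is the Claim_ definition above) =====
theorem try_dotted_key_strategies_py_spec : Claim_equal_try_dotted_key_strategies_py := by
  intro req_prefix req_col row_keys _
  show _ = _
  simp only [try_dotted_key_strategies_py, try_dotted_key_strategies_py_alt,
    pv_fold_state, List.nil_append, Bool.false_or]
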